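-- pv_equiv track=rewrite | github.com/sukanya1426/RAG_Meta_Financial_QA | Step_3/src/impl/query_optimizer.py | _add_context_expansions
-- ===== SOURCE A (Python) =====
-- from typing import List, Dict, Any, Optional, Tuple
--
-- def _add_context_expansions(query: str) -> List[str]:
--     """Add context-specific expansions based on Meta's business."""
--     expansions = []
--     query_lower = query.lower()
--
--     # Add Meta-specific context
--     if 'meta' not in query_lower:
--         expansions.append(f"Meta's {query}")
--
--     # Add business segment context
--     if any(term in query_lower for term in ['revenue', 'income']) and 'family of apps' not in query_lower:
--         expansions.append(f"{query} from Family of Apps")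
--         expansions.append(f"{query} from Reality Labs")
--
--     # Add metric context
--     if any(term in query_lower for term in ['users', 'people']) and 'daily active' not in query_lower:
--         expansions.append(f"Daily active people for {query}")
--
--     return expansions
-- ===== SOURCE B (Python) =====
-- # Branch-free: collapse the three conditions into a 3-bit code once, then the
-- # result is a single lookup in an 8-entry table precomputed at module load.
--
-- _PARTS = (
--     [lambda q: f"Meta's {q}"],
--     [lambda q: f"{q} from Family of Apps", lambda q: f"{q} from Reality Labs"],
--     [lambda q: f"Daily active people for {q}"],
-- )
--
-- _TABLE = [
--     [t for i, part in enumerate(_PARTS) if (code >> i) & 1 for t in part]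
--     for code in range(8)
-- ]
--
--
-- def _add_context_expansions(query: str):
--     ql = query.lower()
--     code = ((1 if 'meta' not in ql else 0)
--             | (2 if ('revenue' in ql or 'income' in ql) and 'family of apps' not in ql else 0)
--             | (4 if ('users' in ql or 'people' in ql) and 'daily active' not in ql else 0))
--     return [t(query) for t in _TABLE[code]]
-- ===== Notes on version B (the rewrite author's own statement) =====
-- stated objective: alternative
-- what changed: Replaces A's sequential if-branch appends by branch-free dispatch: the three conditions are packed into a 3-bit code and the result is a single lookup into an 8-entry table of template lists precomputed at module load.
import Mathlib
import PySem

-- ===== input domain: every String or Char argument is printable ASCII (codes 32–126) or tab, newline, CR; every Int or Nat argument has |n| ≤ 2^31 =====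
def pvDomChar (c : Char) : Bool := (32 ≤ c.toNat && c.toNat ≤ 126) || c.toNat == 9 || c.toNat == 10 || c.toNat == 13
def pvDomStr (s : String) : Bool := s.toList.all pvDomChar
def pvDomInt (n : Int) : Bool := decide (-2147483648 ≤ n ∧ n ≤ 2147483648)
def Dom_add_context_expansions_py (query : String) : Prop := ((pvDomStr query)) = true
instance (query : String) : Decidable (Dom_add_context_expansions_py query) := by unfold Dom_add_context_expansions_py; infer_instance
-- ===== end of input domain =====

-- B collapses the three conditions into a 3-bit code and returns a single lookup
-- in an 8-entry table precomputed once (objective: alternative, branch-free dispatch).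

-- ===== PORT A =====
def add_context_expansions_py (query : String) : List String :=
  let expansions : List String := []
  let query_lower := PySem.Str.lower query
  let expansions :=
    if !(PySem.Str.isIn "meta" query_lower) then expansions ++ ["Meta's " ++ query]
    else expansions
  let expansions :=
    if (["revenue", "income"].any (fun term => PySem.Str.isIn term query_lower))
        && !(PySem.Str.isIn "family of apps" query_lower) then
      (expansions ++ [query ++ " from Family of Apps"]) ++ [query ++ " from Reality Labs"]
    else expansions
  let expansions :=
    if (["users", "people"].any (fun term => PySem.Str.isIn term query_lower))
        && !(PySem.Str.isIn "daily active" query_lower) then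
      expansions ++ ["Daily active people for " ++ query]
    else expansions
  expansions

-- ===== PORT B =====
-- _PARTS from Source B: the template closures, one group per bit
def pvParts : List (List (String → String)) :=
  [[fun q => "Meta's " ++ q],
   [fun q => q ++ " from Family of Apps", fun q => q ++ " from Reality Labs"],
   [fun q => "Daily active people for " ++ q]]

-- _TABLE from Source B, precomputed over range(8); indices/codes are nonnegative Python
-- ints throughout, so Nat shifts/masks are exact here (zipIdx = enumerate)
def pvTable : List (List (String → String)) :=
  (List.range 8).map (fun code =>
    (pvParts.zipIdx).flatMap (fun p =>
      if (code >>> p.2) &&& 1 == 1 then p.1 else []))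

def add_context_expansions_py_alt (query : String) : List String :=
  let ql := PySem.Str.lower query
  let code : Nat :=
    (if !(PySem.Str.isIn "meta" ql) then 1 else 0)
    ||| (if (PySem.Str.isIn "revenue" ql || PySem.Str.isIn "income" ql)
            && !(PySem.Str.isIn "family of apps" ql) then 2 else 0)
    ||| (if (PySem.Str.isIn "users" ql || PySem.Str.isIn "people" ql)
            && !(PySem.Str.isIn "daily active" ql) then 4 else 0)
  -- code < 8 always, so _TABLE[code] never raises; getD is exact here
  (pvTable.getD code []).map (fun t => t query)

-- ===== PRECONDITION & SPEC =====
def Spec_add_context_expansions_py (query : String) (out : List String) : Prop := out = add_context_expansions_py_alt query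
instance (query : String) (out : List String) : Decidable (Spec_add_context_expansions_py query out) := by unfold Spec_add_context_expansions_py; infer_instance

-- ===== CLAIM =====
def Claim_equal_add_context_expansions_py : Prop := ∀ (query : String), Dom_add_context_expansions_py query → Spec_add_context_expansions_py query (add_context_expansions_py query)

-- ===== LEMMAS AND PROOFS =====

theorem pvTable_eval : pvTable =
    [[], [fun q => "Meta's " ++ q],
     [fun q => q ++ " from Family of Apps", fun q => q ++ " from Reality Labs"],
     [fun q => "Meta's " ++ q, fun q => q ++ " from Family of Apps", fun q => q ++ " from Reality Labs"],
     [fun q => "Daily active people for " ++ q],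
     [fun q => "Meta's " ++ q, fun q => "Daily active people for " ++ q],
     [fun q => q ++ " from Family of Apps", fun q => q ++ " from Reality Labs", fun q => "Daily active people for " ++ q],
     [fun q => "Meta's " ++ q, fun q => q ++ " from Family of Apps", fun q => q ++ " from Reality Labs", fun q => "Daily active people for " ++ q]] := by
  rfl

-- ===== VERDICT =====
theorem add_context_expansions_py_spec : Claim_equal_add_context_expansions_py := by
  intro query _
  unfold Spec_add_context_expansions_py add_context_expansions_py add_context_expansions_py_alt
  simp only [List.any_cons, List.any_nil, Bool.or_false]
  cases h1 : PySem.Str.isIn "meta" (PySem.Str.lower query) <;>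
  cases h2 : PySem.Str.isIn "revenue" (PySem.Str.lower query) <;>
  cases h3 : PySem.Str.isIn "income" (PySem.Str.lower query) <;>
  cases h4 : PySem.Str.isIn "family of apps" (PySem.Str.lower query) <;>
  cases h5 : PySem.Str.isIn "users" (PySem.Str.lower query) <;>
  cases h6 : PySem.Str.isIn "people" (PySem.Str.lower query) <;>
  cases h7 : PySem.Str.isIn "daily active" (PySem.Str.lower query) <;>
    simp [pvTable_eval]
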